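-- pv_equiv track=rewrite | github.com/guswnee00/PrepareCodingTest | 프로그래머스/0/120863. 다항식 더하기/다항식 더하기.py | solution
-- ===== SOURCE A (Python) =====
-- def solution(polynomial):
--     p = polynomial.replace(' ', '').split('+')
--     x, c = 0, 0
--
--     for i in p:
--         if 'x' in i:
--             if len(i) == 1:
--                 x += 1
--             else:
--                 x += int(i[:-1])
--         else:
--             c += int(i)
--
--     if c == 0:
--         if x == 0:
--             return ('0')
--         elif x == 1:
--             return ('x')
--         elif x > 1:
--             return (str(x) + 'x')
--     elif c != 0:
--         if x == 0:
--             return str(c)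
--         elif x == 1:
--             return ('x + ' + str(c))
--         elif x > 1:
--             return (str(x) + 'x + ' + str(c))
-- ===== SOURCE B (Python) =====
-- def solution(polynomial):
--     x, c = 0, 0
--     run = ''                      # characters of the number being scanned
--     for ch in polynomial + '+':   # sentinel '+' flushes the last term
--         if ch == ' ':
--             continue
--         if ch == 'x':
--             x += int(run) if run else 1
--             run = ''
--         elif ch == '+':
--             if run:
--                 c += int(run)
--             run = ''
--         else:
--             run += ch
--     parts = []
--     if x:
--         parts.append('x' if x == 1 else str(x) + 'x')
--     if c:
--         parts.append(str(c))
--     return ' + '.join(parts) if parts else '0'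
-- ===== Notes on version B (the rewrite author's own statement) =====
-- stated objective: simpler
-- what changed: Replaces A's three-stage replace(' ','')/split('+')/int-per-term pipeline and its six-way if/elif output tree by a single left-to-right character scan (a tokenizer that skips spaces and flushes the accumulated run at each 'x' and '+', with a sentinel '+' for the last term) followed by joining an optional-parts list (or '0' when empty).
-- outside the precondition, e.g. on solution('-1x+2x'): A returns 'x', B returns 'x'; on solution('-1x'): A returns None, B returns '-1x'; on solution(''): A raises ValueError, B returns '0'
import Mathlib
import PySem

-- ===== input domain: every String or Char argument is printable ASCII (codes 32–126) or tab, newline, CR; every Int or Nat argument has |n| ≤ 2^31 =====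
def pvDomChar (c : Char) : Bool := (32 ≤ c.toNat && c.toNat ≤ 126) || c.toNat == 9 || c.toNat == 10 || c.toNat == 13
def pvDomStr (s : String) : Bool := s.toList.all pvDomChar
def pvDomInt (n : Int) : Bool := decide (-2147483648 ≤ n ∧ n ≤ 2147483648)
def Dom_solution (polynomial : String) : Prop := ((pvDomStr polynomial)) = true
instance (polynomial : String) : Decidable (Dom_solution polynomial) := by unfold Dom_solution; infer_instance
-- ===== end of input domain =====

-- B replaces A's replace/split/int-per-term pipeline by a single left-to-right character
-- scan (a tokenizer flushing the current run at each 'x' and '+') and composes the output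
-- from an optional-parts list instead of A's six-way if/elif tree: simpler, same cost.

-- ===== PORT A =====
-- A's accumulation loop over the '+'-separated terms, as a fold on the pair (x, c)
def pvStepA (s : Int × Int) (i : String) : Int × Int :=
  if PySem.Str.isIn "x" i then
    if PySem.Str.len i == 1 then (s.1 + 1, s.2)
    else (s.1 + (PySem.Int.ofStr? (PySem.Str.slice i none (some (-1)))).getD 0, s.2)
  else (s.1, s.2 + (PySem.Int.ofStr? i).getD 0)
  -- .getD 0 stands where Python's int() would raise ValueError; such inputs are outside Pre_

def solution (polynomial : String) : String :=
  let p := (PySem.Str.split? (PySem.Str.replace polynomial " " "") "+").getD []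
  let xc := p.foldl pvStepA (0, 0)
  let x := xc.1
  let c := xc.2
  if c = 0 then
    if x = 0 then "0"
    else if x = 1 then "x"
    else if x > 1 then PySem.Int.toStr x ++ "x"
    else ""  -- Python falls through and returns None here (x < 0); outside Pre_
  else
    if x = 0 then PySem.Int.toStr c
    else if x = 1 then "x + " ++ PySem.Int.toStr c
    else if x > 1 then PySem.Int.toStr x ++ "x + " ++ PySem.Int.toStr c
    else ""  -- Python returns None here (x < 0); outside Pre_

-- ===== PORT B =====
-- one step of B's character scanner: state = (x-total, constant-total, current run)
def scanStep (st : Int × Int × List Char) (ch : Char) : Int × Int × List Char :=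
  if ch = ' ' then st
  else if ch = 'x' then
    (st.1 + (if st.2.2.isEmpty then 1 else (PySem.Int.ofChars? st.2.2).getD 0), st.2.1, [])
  else if ch = '+' then
    (st.1, (if st.2.2.isEmpty then st.2.1 else st.2.1 + (PySem.Int.ofChars? st.2.2).getD 0), [])
  else (st.1, st.2.1, st.2.2 ++ [ch])
  -- .getD 0 stands where Python's int() would raise ValueError; such inputs are outside Pre_

def solution_alt (polynomial : String) : String :=
  let st := (polynomial.toList ++ ['+']).foldl scanStep (0, 0, [])
  let x := st.1
  let c := st.2.1
  let parts := (if x ≠ 0 then [if x = 1 then "x" else PySem.Int.toStr x ++ "x"] else []) ++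
               (if c ≠ 0 then [PySem.Int.toStr c] else [])
  if parts.isEmpty then "0" else PySem.Str.join " + " parts

-- ===== PRECONDITION & SPEC =====
-- A term is admitted when Python's int() would succeed on it, its only 'x' (if any) is the
-- final character (automatic whenever int() succeeds), and an x-term's coefficient is nonnegative.
def pvTermOK (t : String) : Bool :=
  if PySem.Str.isIn "x" t then
    (t.toList.getLast? == some 'x') && !(t.toList.dropLast.contains 'x') &&
    (PySem.Str.len t == 1 ||
      (match PySem.Int.ofChars? t.toList.dropLast with
       | some k => decide (0 ≤ k)
       | none => false))
  else (PySem.Int.ofStr? t).isSome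

-- Pre_ excludes (a) terms on which Python's int() raises ValueError, and (b) negative
-- x-term coefficients, the source of the negative totals on which A falls through all its
-- branches and returns None instead of a string (on a few inputs with a negative x-term but a
-- nonnegative total, e.g. '-1x+2x', A still returns a string and B returns the same string).
def Pre_solution (polynomial : String) : Prop :=
  (((PySem.Str.split? (PySem.Str.replace polynomial " " "") "+").getD []).all pvTermOK) = true

instance (polynomial : String) : Decidable (Pre_solution polynomial) := by
  unfold Pre_solution; infer_instance

def pvWitness_solution : String := "3x + 7 + x"

def Spec_solution (polynomial : String) (out : String) : Prop := out = solution_alt polynomial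
instance (polynomial : String) (out : String) : Decidable (Spec_solution polynomial out) := by
  unfold Spec_solution; infer_instance

-- ===== CLAIM (what is proved, stated in full; the proofs are below) =====
def Claim_equal_solution : Prop := ∀ (polynomial : String), Dom_solution polynomial →
  Pre_solution polynomial → Spec_solution polynomial (solution polynomial)

-- ===== LEMMAS AND PROOFS =====

-- removing spaces: Python's replace(' ', '') is a filter
lemma pv_replace_go_step (n : Nat) (c : Char) (t acc : List Char) :
    PySem.Chars.replace.go [' '] [] (n+1) (c :: t) acc =
      if [' '].isPrefixOf (c :: t) then PySem.Chars.replace.go [' '] [] n t acc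
      else PySem.Chars.replace.go [' '] [] n t (c :: acc) := rfl

lemma pv_replace_go_filter : ∀ (fuel : Nat) (l acc : List Char), l.length ≤ fuel →
    PySem.Chars.replace.go [' '] [] fuel l acc = acc.reverse ++ l.filter (fun ch => ch ≠ ' ') := by
  intro fuel
  induction fuel with
  | zero =>
    intro l acc h
    have : l = [] := List.eq_nil_of_length_eq_zero (by omega)
    subst this
    rw [PySem.Chars.replace.go.eq_def]
    simp
  | succ n ih =>
    intro l acc h
    cases l with
    | nil => rw [PySem.Chars.replace.go.eq_def]; simp
    | cons c t =>
      rw [pv_replace_go_step]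
      by_cases hc : c = ' '
      · subst hc
        rw [if_pos (by simp [List.isPrefixOf])]
        rw [ih t acc (by simpa using h)]
        simp
      · rw [if_neg (by simp [List.isPrefixOf]; exact fun h' => hc h'.symm)]
        rw [ih t (c :: acc) (by simpa using h)]
        simp [hc]

lemma pv_replace_filter (cs : List Char) :
    PySem.Chars.replace cs [' '] [] = cs.filter (fun ch => ch ≠ ' ') := by
  rw [PySem.Chars.replace]
  rw [if_neg (by simp)]
  rw [pv_replace_go_filter cs.length cs [] le_rfl]
  simp

-- a structural description of Python's split('+')
def pvConsHead (c : Char) : List (List Char) → List (List Char)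
  | [] => [[c]]
  | t :: ts => (c :: t) :: ts

def pvSplit : List Char → List (List Char)
  | [] => [[]]
  | c :: t => if c = '+' then [] :: pvSplit t else pvConsHead c (pvSplit t)

def pvAddPre (p : List Char) : List (List Char) → List (List Char)
  | [] => [p]
  | t :: ts => (p ++ t) :: ts

lemma pv_pvSplit_shape (l : List Char) : ∃ h tl, pvSplit l = h :: tl := by
  induction l with
  | nil => exact ⟨[], [], rfl⟩
  | cons c t ih =>
    rw [pvSplit]
    by_cases hc : c = '+'
    · exact ⟨[], pvSplit t, by rw [if_pos hc]⟩
    · rw [if_neg hc]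
      obtain ⟨h, tl, htl⟩ := ih
      rw [htl]
      exact ⟨c :: h, tl, rfl⟩

lemma pv_splitOn_go_step (n : Nat) (c : Char) (l cur : List Char) (acc : List (List Char)) :
    PySem.Chars.splitOn.go ['+'] (n+1) (c :: l) cur acc =
      if ['+'].isPrefixOf (c :: l) then PySem.Chars.splitOn.go ['+'] n l [] (cur.reverse :: acc)
      else PySem.Chars.splitOn.go ['+'] n l (c :: cur) acc := rfl

lemma pv_splitOn_go_eq : ∀ (fuel : Nat) (l cur : List Char) (acc : List (List Char)),
    l.length < fuel →
    PySem.Chars.splitOn.go ['+'] fuel l cur acc = acc.reverse ++ pvAddPre cur.reverse (pvSplit l) := by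
  intro fuel
  induction fuel with
  | zero => intro l cur acc h; omega
  | succ n ih =>
    intro l cur acc h
    cases l with
    | nil =>
      rw [PySem.Chars.splitOn.go.eq_def]
      simp [pvSplit, pvAddPre]
    | cons c t =>
      rw [pv_splitOn_go_step]
      by_cases hc : c = '+'
      · subst hc
        rw [if_pos (by simp [List.isPrefixOf])]
        rw [ih t [] (cur.reverse :: acc) (by simpa using h)]
        obtain ⟨h1, tl, htl⟩ := pv_pvSplit_shape t
        simp [pvSplit, htl, pvAddPre]
      · rw [if_neg (by simp [List.isPrefixOf]; exact fun h' => hc h'.symm)]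
        rw [ih t (c :: cur) acc (by simpa using h)]
        rw [pvSplit, if_neg hc]
        obtain ⟨h1, tl, htl⟩ := pv_pvSplit_shape t
        simp [htl, pvConsHead, pvAddPre]

lemma pv_splitOn_eq (cs : List Char) : PySem.Chars.splitOn cs ['+'] = pvSplit cs := by
  rw [PySem.Chars.splitOn]
  rw [pv_splitOn_go_eq (cs.length + 1) cs [] [] (by omega)]
  obtain ⟨h, tl, htl⟩ := pv_pvSplit_shape cs
  simp [htl, pvAddPre]

-- every character of a piece of pvSplit l comes from l and is not '+'
lemma pv_pvSplit_chars : ∀ (l : List Char) (t : List Char), t ∈ pvSplit l →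
    ∀ ch ∈ t, ch ∈ l ∧ ch ≠ '+' := by
  intro l
  induction l with
  | nil =>
    intro t ht ch hch
    simp [pvSplit] at ht
    subst ht; simp at hch
  | cons c rest ih =>
    intro t ht ch hch
    rw [pvSplit] at ht
    by_cases hc : c = '+'
    · rw [if_pos hc] at ht
      rcases List.mem_cons.mp ht with h1 | h2
      · subst h1; simp at hch
      · obtain ⟨h3, h4⟩ := ih t h2 ch hch
        exact ⟨List.mem_cons_of_mem _ h3, h4⟩
    · rw [if_neg hc] at ht
      obtain ⟨h1, tl, htl⟩ := pv_pvSplit_shape rest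
      rw [htl] at ht
      rcases List.mem_cons.mp ht with h2 | h2
      · subst h2
        rcases List.mem_cons.mp hch with h3 | h3
        · subst h3; exact ⟨List.mem_cons_self, hc⟩
        · obtain ⟨h4, h5⟩ := ih h1 (by rw [htl]; exact List.mem_cons_self) ch h3
          exact ⟨List.mem_cons_of_mem _ h4, h5⟩
      · obtain ⟨h4, h5⟩ := ih t (by rw [htl]; exact List.mem_cons_of_mem _ h2) ch hch
        exact ⟨List.mem_cons_of_mem _ h4, h5⟩

-- B's scanner ignores spaces
lemma pv_scan_filter (cs : List Char) (st : Int × Int × List Char) :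
    cs.foldl scanStep st = (cs.filter (fun ch => ch ≠ ' ')).foldl scanStep st := by
  induction cs generalizing st with
  | nil => rfl
  | cons c t ih =>
    by_cases hc : c = ' '
    · subst hc
      simp only [List.foldl_cons, List.filter_cons]
      rw [show scanStep st ' ' = st from rfl]
      simpa using ih st
    · simp only [List.foldl_cons, List.filter_cons]
      rw [if_pos (by simp [hc])]
      simp only [List.foldl_cons]
      exact ih (scanStep st c)

-- scanning one whole term (its characters, then the terminating '+')
def pvProcTerm : Int × Int × List Char → List Char → Int × Int
  | st, [] => (st.1, if st.2.2.isEmpty then st.2.1 else st.2.1 + (PySem.Int.ofChars? st.2.2).getD 0)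
  | st, ch :: t => pvProcTerm (scanStep st ch) t

def pvFoldTerms (s : Int × Int) (run : List Char) : List (List Char) → Int × Int
  | [] => s
  | t :: tl => tl.foldl (fun s t => pvProcTerm (s.1, s.2, []) t) (pvProcTerm (s.1, s.2, run) t)

-- the scanner over 'ds + "+"' processes exactly the '+'-separated pieces of ds
lemma pv_scan_terms : ∀ (ds : List Char) (st : Int × Int × List Char),
    (ds ++ ['+']).foldl scanStep st =
      ((pvFoldTerms (st.1, st.2.1) st.2.2 (pvSplit ds)).1,
       (pvFoldTerms (st.1, st.2.1) st.2.2 (pvSplit ds)).2, []) := by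
  intro ds
  induction ds with
  | nil =>
    intro st
    simp only [List.nil_append, List.foldl_cons, List.foldl_nil]
    rw [pvSplit]
    rw [show pvFoldTerms (st.1, st.2.1) st.2.2 [[]] = pvProcTerm (st.1, st.2.1, st.2.2) [] from rfl]
    rw [show pvProcTerm (st.1, st.2.1, st.2.2) [] =
      (st.1, if st.2.2.isEmpty then st.2.1 else st.2.1 + (PySem.Int.ofChars? st.2.2).getD 0) from rfl]
    rw [scanStep]
    rw [if_neg (by decide), if_neg (by decide), if_pos rfl]
  | cons c t ih =>
    intro st
    simp only [List.cons_append, List.foldl_cons]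
    rw [ih (scanStep st c)]
    rw [pvSplit]
    by_cases hc : c = '+'
    · subst hc
      rw [if_pos rfl]
      obtain ⟨h1, tl, htl⟩ := pv_pvSplit_shape t
      rw [htl]
      have hstep : scanStep st '+' =
          (st.1, (if st.2.2.isEmpty then st.2.1 else st.2.1 + (PySem.Int.ofChars? st.2.2).getD 0), []) := by
        rw [scanStep]; rw [if_neg (by decide), if_neg (by decide), if_pos rfl]
      rw [hstep]
      rfl
    · rw [if_neg hc]
      obtain ⟨h1, tl, htl⟩ := pv_pvSplit_shape t
      rw [htl]
      rw [show pvConsHead c (h1 :: tl) = (c :: h1) :: tl from rfl]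
      rw [show pvFoldTerms (st.1, st.2.1) st.2.2 ((c :: h1) :: tl) =
        tl.foldl (fun s t => pvProcTerm (s.1, s.2, []) t) (pvProcTerm (st.1, st.2.1, st.2.2) (c :: h1)) from rfl]
      rw [show pvProcTerm (st.1, st.2.1, st.2.2) (c :: h1) = pvProcTerm (scanStep (st.1, st.2.1, st.2.2) c) h1 from rfl]
      rw [show (st.1, st.2.1, st.2.2) = st from rfl]
      rw [show pvFoldTerms ((scanStep st c).1, (scanStep st c).2.1) (scanStep st c).2.2 (h1 :: tl) =
        tl.foldl (fun s t => pvProcTerm (s.1, s.2, []) t) (pvProcTerm ((scanStep st c).1, (scanStep st c).2.1, (scanStep st c).2.2) h1) from rfl]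

lemma pv_foldTerms_nil_run (s : Int × Int) (ts : List (List Char)) :
    pvFoldTerms s [] ts = ts.foldl (fun s t => pvProcTerm (s.1, s.2, []) t) s := by
  cases ts with
  | nil => rfl
  | cons t tl => rfl

-- accumulating a run of plain characters
lemma pv_proc_acc : ∀ (t : List Char) (run : List Char) (x c : Int),
    ('x' ∉ t) → (' ' ∉ t) → ('+' ∉ t) →
    pvProcTerm (x, c, run) t =
      (x, if (run ++ t).isEmpty then c else c + (PySem.Int.ofChars? (run ++ t)).getD 0) := by
  intro t
  induction t with
  | nil => intro run x c _ _ _; simp [pvProcTerm]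
  | cons ch t ih =>
    intro run x c hx hs hp
    rw [pvProcTerm]
    rw [scanStep]
    rw [if_neg (by intro h; exact hs (h ▸ List.mem_cons_self)),
        if_neg (by intro h; exact hx (h ▸ List.mem_cons_self)),
        if_neg (by intro h; exact hp (h ▸ List.mem_cons_self))]
    rw [ih (run ++ [ch]) x c (fun h => hx (List.mem_cons_of_mem _ h))
        (fun h => hs (List.mem_cons_of_mem _ h)) (fun h => hp (List.mem_cons_of_mem _ h))]
    simp

lemma pv_proc_accx : ∀ (P : List Char) (rest run : List Char) (x c : Int),
    ('x' ∉ P) → (' ' ∉ P) → ('+' ∉ P) →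
    pvProcTerm (x, c, run) (P ++ 'x' :: rest) =
      pvProcTerm (x + (if (run ++ P).isEmpty then 1 else (PySem.Int.ofChars? (run ++ P)).getD 0), c, []) rest := by
  intro P
  induction P with
  | nil =>
    intro rest run x c _ _ _
    rw [List.nil_append, pvProcTerm]
    rw [scanStep]
    rw [if_neg (by decide), if_pos rfl]
    simp
  | cons ch P ih =>
    intro rest run x c hx hs hp
    rw [List.cons_append, pvProcTerm]
    rw [scanStep]
    rw [if_neg (by intro h; exact hs (h ▸ List.mem_cons_self)),
        if_neg (by intro h; exact hx (h ▸ List.mem_cons_self)),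
        if_neg (by intro h; exact hp (h ▸ List.mem_cons_self))]
    rw [ih rest (run ++ [ch]) x c (fun h => hx (List.mem_cons_of_mem _ h))
        (fun h => hs (List.mem_cons_of_mem _ h)) (fun h => hp (List.mem_cons_of_mem _ h))]
    simp

lemma pv_isIn_x (s : String) : PySem.Str.isIn "x" s = true ↔ 'x' ∈ s.toList := by
  rw [PySem.Str.isIn_iff_infix]
  constructor
  · intro h; exact h.mem (by simp)
  · intro h
    obtain ⟨a, b, hab⟩ := List.append_of_mem h
    exact ⟨a, b, by rw [hab]; simp⟩

lemma pv_ofStr_toList (s : String) : PySem.Int.ofStr? s = PySem.Int.ofChars? s.toList := by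
  rw [PySem.Int.ofStr?.eq_1]

-- on an admitted term, one scanner term-step is exactly A's term-step
lemma pv_proc_eq_stepA (u : String) (s : Int × Int)
    (hok : pvTermOK u = true) (hsp : ' ' ∉ u.toList) (hpl : '+' ∉ u.toList) :
    pvProcTerm (s.1, s.2, []) u.toList = pvStepA s u := by
  rw [pvTermOK] at hok
  rw [pvStepA]
  by_cases hx : PySem.Str.isIn "x" u = true
  · rw [if_pos hx] at hok ⊢
    obtain ⟨⟨hlast, hnox⟩, hcoef⟩ := by simpa using hok
    have hne : u.toList ≠ [] := by
      intro h; rw [h] at hlast; simp at hlast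
    have hdecomp : u.toList = u.toList.dropLast ++ ['x'] := by
      conv_lhs => rw [← List.dropLast_append_getLast hne]
      have h2 := List.getLast?_eq_some_getLast hne
      rw [h2] at hlast
      simp at hlast
      rw [hlast]
    have hnoxD : 'x' ∉ u.toList.dropLast := by
      intro h; exact hnox h
    have hspD : ' ' ∉ u.toList.dropLast := fun h => hsp ((List.dropLast_sublist u.toList).mem h)
    have hplD : '+' ∉ u.toList.dropLast := fun h => hpl ((List.dropLast_sublist u.toList).mem h)
    have hlen1 : u.toList.length = u.toList.dropLast.length + 1 := by
      conv_lhs => rw [hdecomp]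
      simp
    conv_lhs => rw [hdecomp]
    rw [pv_proc_accx u.toList.dropLast [] [] s.1 s.2 hnoxD hspD hplD]
    rw [show ∀ a b : Int, pvProcTerm (a, b, []) [] = (a, b) from fun a b => rfl]
    have hlenstr : PySem.Str.len u = (u.toList.length : Int) := by
      rw [PySem.Str.len_eq, String.length_toList]
    rw [List.nil_append]
    by_cases hD : u.toList.dropLast = []
    · rw [hD]
      simp only [List.isEmpty_nil, ite_true]
      rw [if_pos (by rw [hlenstr, hlen1, hD]; simp)]
    · rw [if_neg (by simpa using hD)]
      rw [if_neg (by
        simp only [beq_iff_eq]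
        rw [hlenstr, hlen1]
        intro h
        have h' : u.toList.dropLast.length + 1 = 1 := by exact_mod_cast h
        exact hD (List.eq_nil_of_length_eq_zero (by omega)))]
      have hslice : (PySem.Str.slice u none (some (-1))).toList = u.toList.dropLast := by
        exact PySem.Str.slice_to_neg_one u
      rw [pv_ofStr_toList, hslice]
  · rw [if_neg hx] at hok ⊢
    have hnox : 'x' ∉ u.toList := fun h => hx ((pv_isIn_x u).mpr h)
    rw [pv_proc_acc u.toList [] s.1 s.2 hnox hsp hpl]
    rw [List.nil_append]
    have hne : ¬ (u.toList.isEmpty = true) := by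
      intro h
      rw [List.isEmpty_iff] at h
      rw [pv_ofStr_toList, h] at hok
      simp [show PySem.Int.ofChars? ([] : List Char) = none from by decide] at hok
    rw [if_neg hne]
    rw [pv_ofStr_toList]

-- under Pre_, A's x-total never decreases along the fold
lemma pv_stepA_x_le (s : Int × Int) (t : String) (h : pvTermOK t = true) :
    s.1 ≤ (pvStepA s t).1 := by
  rw [pvTermOK] at h
  rw [pvStepA]
  by_cases hx : PySem.Str.isIn "x" t = true
  · rw [if_pos hx] at h ⊢
    obtain ⟨-, hcoef⟩ := by simpa using h
    by_cases hl : (PySem.Str.len t == 1) = true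
    · rw [if_pos hl]; simp
    · rw [if_neg hl]
      rcases hcoef with h1 | h2
      · exfalso
        apply hl
        simp [PySem.Str.len_eq, String.length_toList, h1]
      · simp only []
        have : 0 ≤ (PySem.Int.ofStr? (PySem.Str.slice t none (some (-1)))).getD 0 := by
          rw [pv_ofStr_toList, PySem.Str.slice_to_neg_one]
          cases hp : PySem.Int.ofChars? t.toList.dropLast with
          | none => rw [hp] at h2; simp at h2
          | some k => rw [hp] at h2; simp at h2; simpa [hp] using h2
        simp
        omega
  · rw [if_neg hx]

lemma pv_fold_x_mono (ts : List String) (s : Int × Int) (h : ts.all pvTermOK = true) :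
    s.1 ≤ (ts.foldl pvStepA s).1 := by
  induction ts generalizing s with
  | nil => simp
  | cons t ts ih =>
    rw [List.all_cons] at h
    obtain ⟨h1, h2⟩ := by simpa using h
    rw [List.foldl_cons]
    exact le_trans (pv_stepA_x_le s t h1) (ih _ (by simpa using h2))

lemma pv_join_one (a : String) : PySem.Str.join " + " [a] = a := by
  apply String.toList_inj.mp
  simp [PySem.Str.toList_join, PySem.Chars.join_singleton]

lemma pv_join_two (a b : String) :
    PySem.Str.join " + " [a, b] = a ++ " + " ++ b := by
  apply String.toList_inj.mp
  simp [PySem.Str.toList_join, PySem.Chars.join_cons_cons, PySem.Chars.join_singleton]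

-- ===== VERDICT (by name: the statement is the Claim_ definition above) =====
theorem solution_spec : Claim_equal_solution := by
  intro polynomial _ hpre
  unfold Spec_solution solution solution_alt
  simp only []
  set R := PySem.Str.replace polynomial " " "" with hR
  set terms := (PySem.Str.split? R "+").getD [] with hterms
  unfold Pre_solution at hpre
  rw [← hR, ← hterms] at hpre
  -- the split of R is exactly pvSplit of R's characters
  have hsplit : terms.map String.toList = pvSplit R.toList := by
    have h1 : Option.map (fun x => List.map String.toList x) (PySem.Str.split? R "+") =
        PySem.Chars.split? R.toList ['+'] := by
      exact PySem.Str.split?_map R "+"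
    rw [PySem.Chars.split?] at h1
    rw [if_neg (by simp)] at h1
    rw [pv_splitOn_eq] at h1
    obtain ⟨L, hL, hLmap⟩ := Option.map_eq_some_iff.mp h1
    rw [hterms, hL]
    simpa using hLmap
  -- R's characters are the input's characters with spaces removed
  have hds : R.toList = polynomial.toList.filter (fun ch => ch ≠ ' ') := by
    rw [hR, PySem.Str.toList_replace]
    rw [show (" " : String).toList = [' '] from rfl, show ("" : String).toList = [] from rfl]
    exact pv_replace_filter polynomial.toList
  -- B's scan computes A's fold over the terms
  have hscan : (polynomial.toList ++ ['+']).foldl scanStep (0, 0, []) =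
      ((terms.foldl pvStepA (0, 0)).1, (terms.foldl pvStepA (0, 0)).2, []) := by
    rw [pv_scan_filter]
    rw [List.filter_append]
    rw [show List.filter (fun ch => ch ≠ ' ') ['+'] = ['+'] from rfl]
    rw [← hds]
    rw [pv_scan_terms R.toList (0, 0, [])]
    rw [show ((0 : Int), (0 : Int), ([] : List Char)).2.2 = [] from rfl]
    rw [pv_foldTerms_nil_run]
    rw [← hsplit]
    rw [List.foldl_map]
    rw [show (((0:Int), (0:Int), ([]:List Char)).1, ((0:Int), (0:Int), ([]:List Char)).2.1) = ((0:Int), (0:Int)) from rfl]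
    have key : List.foldl (fun s u => pvProcTerm (s.1, s.2, []) u.toList) ((0:Int), (0:Int)) terms =
        List.foldl pvStepA ((0:Int), (0:Int)) terms := by
      apply PySem.List.foldl_congr_mem
      intro acc u hu
      have hok : pvTermOK u = true := List.all_eq_true.mp hpre u hu
      have humem : u.toList ∈ pvSplit R.toList := by
        rw [← hsplit]
        exact List.mem_map_of_mem hu
      have hchars := pv_pvSplit_chars R.toList u.toList humem
      have hsp : ' ' ∉ u.toList := by
        intro h
        obtain ⟨hin, -⟩ := hchars ' ' h
        rw [hds] at hin
        simp at hin
      have hpl : '+' ∉ u.toList := fun h => (hchars '+' h).2 rfl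
      exact pv_proc_eq_stepA u acc hok hsp hpl
    rw [key]
  -- final formatting
  set xc := terms.foldl pvStepA (0, 0) with hxc
  have hscan1 : ((polynomial.toList ++ ['+']).foldl scanStep (0, 0, [])).1 = xc.1 := by rw [hscan]
  have hscan2 : ((polynomial.toList ++ ['+']).foldl scanStep (0, 0, [])).2.1 = xc.2 := by rw [hscan]
  rw [hscan1, hscan2]
  have hX : 0 ≤ xc.1 := pv_fold_x_mono terms (0, 0) hpre
  by_cases hc : xc.2 = 0
  · by_cases hx0 : xc.1 = 0
    · simp [hc, hx0]
    · by_cases hx1 : xc.1 = 1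
      · simp [hc, hx1, pv_join_one]
      · have hxg : xc.1 > 1 := by omega
        simp [hc, hx0, hx1, hxg, pv_join_one]
  · by_cases hx0 : xc.1 = 0
    · simp [hc, hx0, pv_join_one]
    · by_cases hx1 : xc.1 = 1
      · simp [hc, hx1, pv_join_two]
      · have hxg : xc.1 > 1 := by omega
        simp [hc, hx0, hx1, hxg, pv_join_two]
        rw [String.append_assoc]
        congr 1
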